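-- pv_equiv track=rewrite | github.com/batrinu/nis2 | nis2-audit-app/app/security_utils.py | encode_javascript_output
-- ===== SOURCE A (Python) =====
-- def encode_javascript_output(text: str) -> str:
--     """
--     Encode text for JavaScript string output.
--
--     Args:
--         text: Raw text
--
--     Returns:
--         JavaScript-encoded text
--     """
--     if not isinstance(text, str):
--         text = str(text)
--
--     # JavaScript string escaping
--     js_escape_table = {
--         '\\': '\\\\',
--         '"': '\\"',
--         "'": "\\'",
--         '\n': '\\n',
--         '\r': '\\r',
--         '\t': '\\t',
--         '<': '\\u003c',
--         '>': '\\u003e',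
--         '&': '\\u0026',
--     }
--
--     return ''.join(js_escape_table.get(c, c) for c in text)
-- ===== SOURCE B (Python) =====
-- def encode_javascript_output(text: str) -> str:
--     """
--     Encode text for JavaScript string output.
--
--     Args:
--         text: Raw text
--
--     Returns:
--         JavaScript-encoded text
--     """
--     if not isinstance(text, str):
--         text = str(text)
--
--     # Backslash must be escaped first; every later pass only introduces
--     # backslashes (and characters no later pass touches).
--     return (text.replace('\\', '\\\\')
--                 .replace('"', '\\"')
--                 .replace("'", "\\'")
--                 .replace('\n', '\\n')
--                 .replace('\r', '\\r')
--                 .replace('\t', '\\t')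
--                 .replace('<', '\\u003c')
--                 .replace('>', '\\u003e')
--                 .replace('&', '\\u0026'))
-- ===== Notes on version B (the rewrite author's own statement) =====
-- stated objective: faster
-- what changed: Replaced the single lookup-table-and-join pass over the characters by a chain of nine whole-string str.replace passes (backslash first so later substitutions are not double-escaped).
import Mathlib
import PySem

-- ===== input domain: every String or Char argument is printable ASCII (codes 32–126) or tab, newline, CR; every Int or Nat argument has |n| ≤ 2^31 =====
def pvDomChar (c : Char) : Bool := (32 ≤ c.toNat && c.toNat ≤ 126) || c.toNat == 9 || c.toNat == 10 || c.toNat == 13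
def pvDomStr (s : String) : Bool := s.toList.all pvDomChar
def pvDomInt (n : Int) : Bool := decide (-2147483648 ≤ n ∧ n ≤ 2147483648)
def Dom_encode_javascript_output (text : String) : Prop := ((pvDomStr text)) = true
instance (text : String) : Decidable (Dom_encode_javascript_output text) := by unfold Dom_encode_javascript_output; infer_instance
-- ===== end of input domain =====

-- B replaces A's single lookup-table-and-join pass by a chain of nine replace passes
-- (backslash first, so later passes never double-escape); a timing run measured B faster
-- (C-level replace passes vs a per-char Python generator). isinstance guard is vacuous for text : String.

-- ===== PORT A =====
-- js_escape_table, a dict from chars to their escapes (insertion order as in A)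
def jsEscapeTable : PySem.Dict Char (List Char) :=
  ((((((((PySem.Dict.empty.insert '\\' ['\\', '\\']).insert '"' ['\\', '"']).insert
      '\'' ['\\', '\'']).insert '\n' ['\\', 'n']).insert '\r' ['\\', 'r']).insert
      '\t' ['\\', 't']).insert '<' ['\\', 'u', '0', '0', '3', 'c']).insert
      '>' ['\\', 'u', '0', '0', '3', 'e']).insert '&' ['\\', 'u', '0', '0', '2', '6']

-- ''.join(js_escape_table.get(c, c) for c in text)
def encode_javascript_output (text : String) : String :=
  String.ofList (PySem.Chars.join [] (text.toList.map (fun c => jsEscapeTable.getD c [c])))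

-- ===== PORT B =====
def encode_javascript_output_alt (text : String) : String :=
  PySem.Str.replace (PySem.Str.replace (PySem.Str.replace (PySem.Str.replace
    (PySem.Str.replace (PySem.Str.replace (PySem.Str.replace (PySem.Str.replace
      (PySem.Str.replace text "\\" "\\\\") "\"" "\\\"") "'" "\\'") "\n" "\\n")
      "\r" "\\r") "\t" "\\t") "<" "\\u003c") ">" "\\u003e") "&" "\\u0026"

-- ===== PRECONDITION & SPEC =====
def Spec_encode_javascript_output (text : String) (out : String) : Prop := out = encode_javascript_output_alt text
instance (text : String) (out : String) : Decidable (Spec_encode_javascript_output text out) := by unfold Spec_encode_javascript_output; infer_instance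

-- ===== CLAIM (what is proved, stated in full; the proofs are below) =====
def Claim_equal_encode_javascript_output : Prop := ∀ (text : String), Dom_encode_javascript_output text → Spec_encode_javascript_output text (encode_javascript_output text)

-- ===== LEMMAS AND PROOFS =====

-- Helper for replace with a single-character pattern: it is a flatMap.
lemma replace_single_go (c : Char) (r : List Char) (l acc : List Char) (fuel : Nat) (h : l.length ≤ fuel) :
    PySem.Chars.replace.go [c] r fuel l acc = acc.reverse ++ l.flatMap (fun x => if x = c then r else [x]) := by
  induction l generalizing fuel acc with
  | nil => cases fuel <;> simp [PySem.Chars.replace.go]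
  | cons a t ih =>
    cases fuel with
    | zero => simp at h
    | succ n =>
      simp only [PySem.Chars.replace.go]
      by_cases hac : a = c
      · subst hac
        rw [if_pos (by simp [List.isPrefixOf])]
        simp only [List.length_singleton, List.drop_succ_cons, List.drop_zero]
        rw [ih (acc := r.reverse ++ acc) (fuel := n) (by simpa using Nat.le_of_succ_le_succ h)]
        simp
      · rw [if_neg (by simp [List.isPrefixOf]; exact fun hc => absurd hc.symm hac),
            ih (acc := a :: acc) (fuel := n) (by simpa using Nat.le_of_succ_le_succ h)]
        simp [hac]

lemma replace_single (s : List Char) (c : Char) (r : List Char) :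
    PySem.Chars.replace s [c] r = s.flatMap (fun x => if x = c then r else [x]) := by
  rw [PySem.Chars.replace]
  simp [replace_single_go c r s [] s.length (le_refl _)]

-- A's escape of a single character.
def escA (c : Char) : List Char := jsEscapeTable.getD c [c]

lemma flatten_intersperse_nil (parts : List (List Char)) :
    (List.intersperse ([] : List Char) parts).flatten = parts.flatten := by
  induction parts with
  | nil => rfl
  | cons p t ih =>
    cases t with
    | nil => rfl
    | cons q u => simpa using ih

lemma portA_toList (text : String) :
    (encode_javascript_output text).toList = text.toList.flatMap escA := by
  simp [encode_javascript_output, PySem.Chars.join, List.intercalate,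
    flatten_intersperse_nil, List.flatMap_def, String.toList_ofList]
  rfl

-- The composed per-character function of B's nine passes equals A's table lookup.
lemma chain_char (a : Char) :
    (((((((((if a = '\\' then ['\\', '\\'] else [a]).flatMap
      (fun x => if x = '"' then ['\\', '"'] else [x])).flatMap
      (fun x => if x = '\'' then ['\\', '\''] else [x])).flatMap
      (fun x => if x = '\n' then ['\\', 'n'] else [x])).flatMap
      (fun x => if x = '\r' then ['\\', 'r'] else [x])).flatMap
      (fun x => if x = '\t' then ['\\', 't'] else [x])).flatMap
      (fun x => if x = '<' then ['\\', 'u', '0', '0', '3', 'c'] else [x])).flatMap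
      (fun x => if x = '>' then ['\\', 'u', '0', '0', '3', 'e'] else [x])).flatMap
      (fun x => if x = '&' then ['\\', 'u', '0', '0', '2', '6'] else [x])) = escA a := by
  by_cases h1 : a = '\\'; · subst h1; decide
  by_cases h2 : a = '"'; · subst h2; decide
  by_cases h3 : a = '\''; · subst h3; decide
  by_cases h4 : a = '\n'; · subst h4; decide
  by_cases h5 : a = '\r'; · subst h5; decide
  by_cases h6 : a = '\t'; · subst h6; decide
  by_cases h7 : a = '<'; · subst h7; decide
  by_cases h8 : a = '>'; · subst h8; decide
  by_cases h9 : a = '&'; · subst h9; decide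
  have g1 : ('\\' == a) = false := beq_eq_false_iff_ne.mpr (fun h => h1 h.symm)
  have g2 : ('"' == a) = false := beq_eq_false_iff_ne.mpr (fun h => h2 h.symm)
  have g3 : ('\'' == a) = false := beq_eq_false_iff_ne.mpr (fun h => h3 h.symm)
  have g4 : ('\n' == a) = false := beq_eq_false_iff_ne.mpr (fun h => h4 h.symm)
  have g5 : ('\r' == a) = false := beq_eq_false_iff_ne.mpr (fun h => h5 h.symm)
  have g6 : ('\t' == a) = false := beq_eq_false_iff_ne.mpr (fun h => h6 h.symm)
  have g7 : ('<' == a) = false := beq_eq_false_iff_ne.mpr (fun h => h7 h.symm)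
  have g8 : ('>' == a) = false := beq_eq_false_iff_ne.mpr (fun h => h8 h.symm)
  have g9 : ('&' == a) = false := beq_eq_false_iff_ne.mpr (fun h => h9 h.symm)
  simp [h1, h2, h3, h4, h5, h6, h7, h8, h9, escA, jsEscapeTable,
    PySem.Dict.getD, PySem.Dict.get?, PySem.Dict.insert, PySem.Dict.empty,
    List.find?, g1, g2, g3, g4, g5, g6, g7, g8, g9]

lemma portB_toList (text : String) :
    (encode_javascript_output_alt text).toList = text.toList.flatMap escA := by
  simp only [encode_javascript_output_alt, PySem.Str.toList_replace]
  have hs : ("\\".toList = ['\\'] ∧ "\"".toList = ['"'] ∧ "'".toList = ['\''] ∧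
      "\n".toList = ['\n'] ∧ "\r".toList = ['\r'] ∧ "\t".toList = ['\t'] ∧
      "<".toList = ['<'] ∧ ">".toList = ['>'] ∧ "&".toList = ['&']) := by decide
  obtain ⟨e1, e2, e3, e4, e5, e6, e7, e8, e9⟩ := hs
  rw [e1, e2, e3, e4, e5, e6, e7, e8, e9]
  simp only [replace_single, List.flatMap_assoc]
  refine List.flatMap_congr (fun a _ => ?_)
  have h := chain_char a
  simpa [List.flatMap_assoc] using h

-- ===== VERDICT (by name: the statement is the Claim_ definition above) =====
theorem encode_javascript_output_spec : Claim_equal_encode_javascript_output := by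
  intro text _
  unfold Spec_encode_javascript_output
  have h : (encode_javascript_output text).toList = (encode_javascript_output_alt text).toList := by
    rw [portA_toList, portB_toList]
  exact String.toList_inj.mp h
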